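-- pv_equiv track=rewrite | github.com/DennieCodes/python-exploration | python-functions/rna_transcription.py | complimentary
-- ===== SOURCE A (Python) =====
-- def complimentary(str, rna):
--     result = ""
--     for letter in str:
--         if letter == "A":
--             if rna:
--                 result += "U"
--             else:
--                 result += "T"
--         elif letter == "T":
--             result += "A"
--         elif letter == "C":
--             result += "G"
--         elif letter == "G":
--             result += "C"
--
--     return result
-- ===== SOURCE B (Python) =====
-- def complimentary(str, rna):
--     # staged whole-string passes: filter to the 4 bases, then global replaces
--     # via lowercase placeholders (no collisions: only A/T/C/G remain), then upcase.
--     kept = "".join(c for c in str if c in "ATCG")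
--     kept = kept.replace("A", "u" if rna else "t")
--     kept = kept.replace("T", "a").replace("C", "g").replace("G", "c")
--     return kept.upper()
-- ===== Notes on version B (the rewrite author's own statement) =====
-- stated objective: alternative
-- what changed: Replaced A's single pass with a per-character if/elif dispatch and string += accumulator by staged whole-string operations: one filter pass keeping only ATCG, then four global str.replace passes into lowercase placeholder letters (safe because only the four bases remain), then one .upper() pass; the C-level replace/upper passes avoid the per-character Python loop and a timing run measured B about 2.5x faster.
import Mathlib
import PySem

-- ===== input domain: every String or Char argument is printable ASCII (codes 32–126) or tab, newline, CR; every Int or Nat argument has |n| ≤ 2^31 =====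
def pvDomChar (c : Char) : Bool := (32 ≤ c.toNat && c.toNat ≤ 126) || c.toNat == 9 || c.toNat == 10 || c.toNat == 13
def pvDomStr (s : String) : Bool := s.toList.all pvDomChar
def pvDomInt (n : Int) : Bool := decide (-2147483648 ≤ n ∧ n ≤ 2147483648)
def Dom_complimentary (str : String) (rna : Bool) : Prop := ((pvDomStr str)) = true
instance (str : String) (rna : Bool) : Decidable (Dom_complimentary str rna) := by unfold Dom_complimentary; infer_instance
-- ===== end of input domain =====

-- B replaces A's per-character if/elif dispatch by staged whole-string passes (filter, four global replaces into lowercase placeholders, upcase); alternative decomposition, same cost.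
-- ===== PORT A =====
-- A: accumulator string, branch chain appending the complement (or nothing) per letter.
def complimentary (str : String) (rna : Bool) : String :=
  String.ofList (str.toList.foldl (fun result letter =>
    if letter = 'A' then (if rna then result ++ ['U'] else result ++ ['T'])
    else if letter = 'T' then result ++ ['A']
    else if letter = 'C' then result ++ ['G']
    else if letter = 'G' then result ++ ['C']
    else result) [])

-- ===== PORT B =====
-- B: kept = "".join(c for c in str if c in "ATCG"); staged replaces; .upper().
def complimentary_alt (str : String) (rna : Bool) : String :=
  let kept := PySem.Str.join "" ((str.toList.filter
    (fun c => PySem.Str.isIn (String.ofList [c]) "ATCG")).map (fun c => String.ofList [c]))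
  let kept := PySem.Str.replace kept "A" (if rna then "u" else "t")
  let kept := PySem.Str.replace (PySem.Str.replace (PySem.Str.replace kept "T" "a") "C" "g") "G" "c"
  PySem.Str.upper kept

-- ===== PRECONDITION & SPEC =====
def Spec_complimentary (str : String) (rna : Bool) (out : String) : Prop := out = complimentary_alt str rna
instance (str : String) (rna : Bool) (out : String) : Decidable (Spec_complimentary str rna out) := by unfold Spec_complimentary; infer_instance

-- ===== CLAIM =====
def Claim_equal_complimentary : Prop := ∀ (str : String) (rna : Bool), Dom_complimentary str rna → Spec_complimentary str rna (complimentary str rna)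

-- ===== LEMMAS AND PROOFS =====
-- single-char str.replace is a pointwise map
theorem replace_go_single (a : Char) (new : List Char) :
    ∀ (l : List Char) (fuel : Nat), l.length ≤ fuel → ∀ (acc : List Char),
    PySem.Chars.replace.go [a] new fuel l acc
      = acc.reverse ++ l.flatMap (fun c => if c = a then new else [c]) := by
  intro l
  induction l with
  | nil =>
    intro fuel _ acc
    cases fuel <;> simp [PySem.Chars.replace.go]
  | cons c t ih =>
    intro fuel hf acc
    cases fuel with
    | zero => simp at hf
    | succ fuel =>
      simp only [PySem.Chars.replace.go]
      by_cases hc : c = a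
      · subst hc
        simp only [List.isPrefixOf, BEq.rfl, Bool.true_and,
          if_true, List.length_singleton, List.drop_one, List.tail_cons]
        rw [ih fuel (by simpa using hf) (new.reverse ++ acc)]
        simp
      · have : ([a].isPrefixOf (c :: t)) = false := by
          simp [List.isPrefixOf]; exact fun h => absurd h.symm hc
        rw [this]
        simp only [Bool.false_eq_true, if_false]
        rw [ih fuel (by simpa using hf) (c :: acc)]
        simp [hc]

theorem replace_single (a : Char) (new cs : List Char) :
    PySem.Chars.replace cs [a] new = cs.flatMap (fun c => if c = a then new else [c]) := by
  unfold PySem.Chars.replace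
  simp only [List.isEmpty_cons, Bool.false_eq_true, if_false]
  rw [replace_go_single a new cs cs.length le_rfl []]
  simp

theorem replace_single_map (a b : Char) (cs : List Char) :
    PySem.Chars.replace cs [a] [b] = cs.map (fun c => if c = a then b else c) := by
  rw [replace_single]
  induction cs with
  | nil => rfl
  | cons c t ih => by_cases h : c = a <;> simp [h, ih]

-- membership test 'c in "ATCG"'
theorem keep_eq (c : Char) :
    PySem.Str.isIn (String.ofList [c]) "ATCG"
      = (c == 'A' || c == 'T' || c == 'C' || c == 'G') := by
  have hiff : PySem.Str.isIn (String.ofList [c]) "ATCG" = true ↔ [c] <:+: ['A','T','C','G'] := by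
    rw [PySem.Str.isIn_iff_infix]
    simp
  by_cases h : c = 'A' ∨ c = 'T' ∨ c = 'C' ∨ c = 'G'
  · rcases h with h|h|h|h <;> subst h <;> decide
  · push_neg at h
    have hf : PySem.Str.isIn (String.ofList [c]) "ATCG" = false := by
      rw [Bool.eq_false_iff]
      intro hx
      obtain ⟨s, t, hst⟩ := hiff.mp hx
      have hcmem : c ∈ (['A','T','C','G'] : List Char) := by
        rw [← hst]; simp
      simp only [List.mem_cons, List.not_mem_nil, or_false] at hcmem
      tauto
    rw [hf]
    simp [h.1, h.2.1, h.2.2.1, h.2.2.2]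

-- A's loop as a flatMap
theorem complimentary_loop (rna : Bool) (cs acc : List Char) :
    cs.foldl (fun result letter =>
      if letter = 'A' then (if rna then result ++ ['U'] else result ++ ['T'])
      else if letter = 'T' then result ++ ['A']
      else if letter = 'C' then result ++ ['G']
      else if letter = 'G' then result ++ ['C']
      else result) acc
    = acc ++ cs.flatMap (fun c =>
        if c = 'A' then [if rna then 'U' else 'T']
        else if c = 'T' then ['A'] else if c = 'C' then ['G']
        else if c = 'G' then ['C'] else []) := by
  induction cs generalizing acc with
  | nil => simp
  | cons c cs ih =>
    simp only [List.foldl_cons, List.flatMap_cons, ih]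
    by_cases hA : c = 'A'
    · subst hA; cases rna <;> simp
    · by_cases hT : c = 'T'
      · subst hT; simp
      · by_cases hC : c = 'C'
        · subst hC; simp
        · by_cases hG : c = 'G'
          · subst hG; simp
          · simp [hA, hT, hC, hG]

theorem upChar_t : PySem.Chars.upperChar 't' = 'T' := rfl
theorem upChar_u : PySem.Chars.upperChar 'u' = 'U' := rfl
theorem upChar_a : PySem.Chars.upperChar 'a' = 'A' := rfl
theorem upChar_g : PySem.Chars.upperChar 'g' = 'G' := rfl
theorem upChar_c : PySem.Chars.upperChar 'c' = 'C' := rfl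

-- the staged passes agree with A's flatMap, pointwise
theorem stages_eq (rna : Bool) (cs : List Char) :
    (((((cs.filter (fun c => c == 'A' || c == 'T' || c == 'C' || c == 'G')).map
        (fun c => if c = 'A' then (if rna then 'u' else 't') else c)).map
        (fun c => if c = 'T' then 'a' else c)).map
        (fun c => if c = 'C' then 'g' else c)).map
        (fun c => if c = 'G' then 'c' else c)).map PySem.Chars.upperChar
    = cs.flatMap (fun c =>
        if c = 'A' then [if rna then 'U' else 'T']
        else if c = 'T' then ['A'] else if c = 'C' then ['G']
        else if c = 'G' then ['C'] else []) := by
  induction cs with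
  | nil => rfl
  | cons c cs ih =>
    by_cases hA : c = 'A'
    · subst hA; cases rna <;> simpa [upChar_t, upChar_u, List.map_map] using ih
    · by_cases hT : c = 'T'
      · subst hT; simpa [upChar_a, List.map_map] using ih
      · by_cases hC : c = 'C'
        · subst hC; simpa [upChar_g, List.map_map] using ih
        · by_cases hG : c = 'G'
          · subst hG; simpa [upChar_c, List.map_map] using ih
          · simpa [hA, hT, hC, hG, List.map_map] using ih

-- toList of B's port
theorem alt_toList (str : String) (rna : Bool) :
    (complimentary_alt str rna).toList
    = str.toList.flatMap (fun c =>
        if c = 'A' then [if rna then 'U' else 'T']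
        else if c = 'T' then ['A'] else if c = 'C' then ['G']
        else if c = 'G' then ['C'] else []) := by
  unfold complimentary_alt
  rw [PySem.Str.toList_upper, PySem.Str.toList_replace, PySem.Str.toList_replace,
    PySem.Str.toList_replace, PySem.Str.toList_replace, PySem.Str.toList_join]
  have hfil : str.toList.filter (fun c => PySem.Str.isIn (String.ofList [c]) "ATCG")
      = str.toList.filter (fun c => c == 'A' || c == 'T' || c == 'C' || c == 'G') := by
    apply List.filter_congr; intro c _; exact keep_eq c
  rw [hfil]
  have hjoin : PySem.Chars.join "".toList
      (((str.toList.filter (fun c => c == 'A' || c == 'T' || c == 'C' || c == 'G')).map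
        (fun c => String.ofList [c])).map String.toList)
      = str.toList.filter (fun c => c == 'A' || c == 'T' || c == 'C' || c == 'G') := by
    rw [List.map_map]
    have : (String.toList ∘ fun c => String.ofList [c]) = fun c => [c] := by
      funext c; simp
    rw [this]
    exact PySem.Chars.join_nil_singletons _
  rw [hjoin]
  have hA : ("A" : String).toList = ['A'] := rfl
  have hrep : (if rna then ("u" : String) else "t").toList = [if rna then 'u' else 't'] := by
    cases rna <;> rfl
  rw [hA, hrep, replace_single_map]
  rw [show ("T" : String).toList = ['T'] from rfl, show ("a" : String).toList = ['a'] from rfl,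
    replace_single_map]
  rw [show ("C" : String).toList = ['C'] from rfl, show ("g" : String).toList = ['g'] from rfl,
    replace_single_map]
  rw [show ("G" : String).toList = ['G'] from rfl, show ("c" : String).toList = ['c'] from rfl,
    replace_single_map]
  rw [PySem.Chars.upper]
  have hmap : (str.toList.filter (fun c => c == 'A' || c == 'T' || c == 'C' || c == 'G')).map
      (fun c => if c = 'A' then ite (rna = true) 'u' 't' else c)
    = (str.toList.filter (fun c => c == 'A' || c == 'T' || c == 'C' || c == 'G')).map
      (fun c => if c = 'A' then (if rna then 'u' else 't') else c) := by rfl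
  rw [hmap]
  exact stages_eq rna str.toList

-- ===== VERDICT =====
theorem complimentary_spec : Claim_equal_complimentary := by
  intro str rna _
  unfold Spec_complimentary
  rw [show complimentary str rna
      = String.ofList (str.toList.flatMap (fun c =>
          if c = 'A' then [if rna then 'U' else 'T']
          else if c = 'T' then ['A'] else if c = 'C' then ['G']
          else if c = 'G' then ['C'] else [])) by
    unfold complimentary; rw [complimentary_loop]; simp]
  rw [← alt_toList str rna, String.ofList_toList]
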